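-- pv_equiv track=rewrite | github.com/luk3rr/GENETIC_PROGRAMMING | gp/population.py | count_duplicated_genes
-- ===== SOURCE A (Python) =====
-- from typing import List, Tuple
--
-- def count_duplicated_genes(population) -> Tuple[int, List[int]]:
--     """
--     Count the number of duplicated genes in the population
--
--     @param population: The population to count the duplicated genes
--     @return: The number of duplicated genes and the indexes of the duplicated genes
--     """
--     unique_genes = set()
--     duplicated_genes = 0
--     duplicated_indexes = []
--
--     for gene in population:
--         if gene in unique_genes:
--             duplicated_indexes.append(population.index(gene))
--             duplicated_genes += 1
--         else:
--             unique_genes.add(gene)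
--
--     return duplicated_genes, duplicated_indexes
-- ===== SOURCE B (Python) =====
-- def count_duplicated_genes(population):
--     """Group-then-sort re-implementation: bucket all positions by gene in one
--     pass, emit a (position, first_position) pair for every non-first member of
--     each bucket, then sort the pairs by position to restore A's output order."""
--     groups = {}
--     for i, gene in enumerate(population):
--         groups.setdefault(gene, []).append(i)
--     pairs = []
--     for positions in groups.values():
--         first = positions[0]
--         for later in positions[1:]:
--             pairs.append((later, first))
--     pairs.sort(key=lambda p: p[0])
--     return len(pairs), [first for _, first in pairs]
-- ===== Notes on version B (the rewrite author's own statement) =====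
-- stated objective: alternative
-- what changed: Replaces A's incremental seen-set loop with a population.index() rescan per duplicate by a group-then-sort algorithm: one pass buckets every position by gene, each bucket emits (later_position, first_position) pairs, and a final sort by position restores A's output order.
import Mathlib
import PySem

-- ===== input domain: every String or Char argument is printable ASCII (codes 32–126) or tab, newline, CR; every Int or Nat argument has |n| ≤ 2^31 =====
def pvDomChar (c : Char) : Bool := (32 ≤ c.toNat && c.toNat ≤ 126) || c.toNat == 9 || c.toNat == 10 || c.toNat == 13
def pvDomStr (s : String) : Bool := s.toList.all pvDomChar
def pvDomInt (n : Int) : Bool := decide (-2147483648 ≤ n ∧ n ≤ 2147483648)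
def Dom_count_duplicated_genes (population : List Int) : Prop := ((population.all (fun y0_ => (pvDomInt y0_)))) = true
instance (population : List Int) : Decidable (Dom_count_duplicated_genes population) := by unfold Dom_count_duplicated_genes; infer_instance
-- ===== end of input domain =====

-- B replaces A's incremental seen-set loop (with a population.index() rescan per duplicate)
-- by a group-then-sort algorithm: bucket positions by gene, emit (later, first) pairs per
-- bucket, sort the pairs by position (objective: alternative algorithm).

-- ===== PORT A =====
-- loop state: (unique_genes, duplicated_genes, duplicated_indexes).
-- population.index(gene) always succeeds here (gene ∈ population), so '.getD 0' is exact.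
def count_duplicated_genes (population : List Int) : Int × List Int :=
  (population.foldl
    (fun (st : PySem.Set Int × Int × List Int) gene =>
      if PySem.Set.contains st.1 gene then
        (st.1, st.2.1 + 1, st.2.2 ++ [(((PySem.List.index? population gene).getD 0 : Nat) : Int)])
      else
        (PySem.Set.add st.1 gene, st.2))
    (PySem.Set.empty, 0, [])).2

-- ===== PORT B =====
-- inner loop of B's second pass: 'first = positions[0]; for later in positions[1:]: pairs.append((later, first))'
-- every positions bucket is nonempty by construction, so positions[0] succeeds and '.getD 0' is exact.
def pvPairsOfPositions (pos : List Int) : List (Int × Int) :=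
  (PySem.List.slice pos (some 1) none).map
    (fun later => (later, (PySem.List.pyGet? pos 0).getD 0))

-- pairs.sort(key=lambda p: p[0]) is in place, so len(pairs) below is the sorted list's length
def count_duplicated_genes_alt (population : List Int) : Int × List Int :=
  let groups : PySem.Dict Int (List Int) :=
    (PySem.List.enumerate population).foldl
      (fun d p => d.modify p.2 [] (· ++ [p.1])) PySem.Dict.empty
  let pairs : List (Int × Int) :=
    groups.values.foldl (fun acc pos => acc ++ pvPairsOfPositions pos) []
  let sp := PySem.List.sorted pairs (fun p => p.1) false
  ((sp.length : Int), sp.map (fun p => p.2))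

-- ===== PRECONDITION & SPEC =====
def Spec_count_duplicated_genes (population : List Int) (out : Int × List Int) : Prop := out = count_duplicated_genes_alt population
instance (population : List Int) (out : Int × List Int) : Decidable (Spec_count_duplicated_genes population out) := by unfold Spec_count_duplicated_genes; infer_instance

-- ===== CLAIM =====
def Claim_equal_count_duplicated_genes : Prop := ∀ (population : List Int), Dom_count_duplicated_genes population → Spec_count_duplicated_genes population (count_duplicated_genes population)

-- ===== LEMMAS AND PROOFS =====

-- the reference list of (duplicate position, first-occurrence index) pairs, in position order,
-- for the suffix 'suf' of 'pop' starting at position 's'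
def pvDup (pop suf : List Int) (s : Int) : List (Int × Int) :=
  (PySem.List.enumerate suf s).filterMap (fun p =>
    match PySem.List.index? pop p.2 with
    | some j => if (j : Int) < p.1 then some (p.1, (j : Int)) else none
    | none => none)

-- the positions bucket B's first pass builds for gene g
def pvPos (pop : List Int) (g : Int) : List Int :=
  ((PySem.List.enumerate pop).filter (fun p => p.2 == g)).map (·.1)

-- A's loop over the suffix computes exactly pvDup's count and second components
lemma pvA_inv (pop : List Int) : ∀ (suf pre : List Int) (c : Int) (acc : List Int),
    pop = pre ++ suf →
    (suf.foldl
      (fun (st : PySem.Set Int × Int × List Int) gene =>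
        if PySem.Set.contains st.1 gene then
          (st.1, st.2.1 + 1, st.2.2 ++ [(((PySem.List.index? pop gene).getD 0 : Nat) : Int)])
        else
          (PySem.Set.add st.1 gene, st.2))
      (PySem.Set.ofList pre, c, acc)).2
    = (c + ((pvDup pop suf (pre.length : Int)).length : Int),
       acc ++ (pvDup pop suf (pre.length : Int)).map (·.2)) := by
  intro suf
  induction suf with
  | nil =>
    intro pre c acc _
    simp [pvDup, PySem.List.enumerate_nil]
  | cons g rest ih =>
    intro pre c acc hpop
    rw [List.foldl_cons]
    have hlen : (((pre ++ [g]).length : Nat) : Int) = (pre.length : Int) + 1 := by simp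
    by_cases hmem : g ∈ pre
    · have hidx : PySem.List.index? pop g = PySem.List.index? pre g := by
        rw [hpop]; exact PySem.List.index?_append_of_mem _ hmem
      obtain ⟨j, hj⟩ := Option.isSome_iff_exists.1
        ((PySem.List.index?_isSome_iff pre g).2 hmem)
      have hjlt : j < pre.length := by
        obtain ⟨p1, s1, hps, hlen1, _⟩ := (PySem.List.index?_eq_some_iff _ _ _).1 hj
        subst hlen1; rw [hps]; simp
      have hjpop : PySem.List.index? pop g = some j := by rw [hidx, hj]
      have hcontains : PySem.Set.contains (PySem.Set.ofList pre) g = true := by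
        rw [PySem.Set.contains_iff, PySem.Set.mem_ofList]; exact hmem
      have hD : pvDup pop (g :: rest) (pre.length : Int)
          = ((pre.length : Int), (j : Int)) :: pvDup pop rest ((pre.length : Int) + 1) := by
        unfold pvDup
        rw [PySem.List.enumerate_cons, List.filterMap_cons, hjpop]
        simp only []
        rw [if_pos (by exact_mod_cast hjlt)]
      rw [if_pos hcontains]
      have hstep := ih (pre ++ [g]) (c + 1) (acc ++ [(((PySem.List.index? pop g).getD 0 : Nat) : Int)])
        (by rw [hpop, List.append_assoc]; rfl)
      rw [hlen] at hstep
      have hpre : PySem.Set.ofList (pre ++ [g]) = PySem.Set.ofList pre := by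
        rw [PySem.Set.ofList_append_singleton,
            PySem.Set.add_of_mem (by rwa [PySem.Set.mem_ofList])]
      rw [hpre] at hstep
      dsimp only
      rw [hstep, hD, hjpop]
      simp only [List.length_cons, List.map_cons, Option.getD_some, Prod.mk.injEq]
      constructor
      · push_cast; ring
      · simp
    · have hjpop : PySem.List.index? pop g = some pre.length := by
        rw [hpop]
        exact (PySem.List.index?_eq_some_iff _ _ _).2 ⟨pre, rest, rfl, rfl, hmem⟩
      have hD : pvDup pop (g :: rest) (pre.length : Int)
          = pvDup pop rest ((pre.length : Int) + 1) := by
        unfold pvDup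
        rw [PySem.List.enumerate_cons, List.filterMap_cons, hjpop]
        simp only []
        rw [if_neg (by omega)]
      rw [if_neg (by simpa [PySem.Set.contains_iff, PySem.Set.mem_ofList] using hmem)]
      have hadd : PySem.Set.add (PySem.Set.ofList pre) g = PySem.Set.ofList (pre ++ [g]) := by
        rw [PySem.Set.ofList_append_singleton]
      have hstep := ih (pre ++ [g]) c acc (by rw [hpop, List.append_assoc]; rfl)
      rw [hlen] at hstep
      dsimp only
      rw [hadd, hstep, hD]

-- pvDup over the whole list, snoc step
lemma pvDup_snoc (xs : List Int) (g : Int) :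
    pvDup (xs ++ [g]) (xs ++ [g]) 0
      = pvDup xs xs 0 ++
        (if g ∈ xs then [((xs.length : Int), (((PySem.List.index? xs g).getD 0 : Nat) : Int))] else []) := by
  unfold pvDup
  rw [PySem.List.enumerate_append, List.filterMap_append]
  have h1 : ∀ p ∈ PySem.List.enumerate xs 0,
      PySem.List.index? (xs ++ [g]) p.2 = PySem.List.index? xs p.2 := by
    intro p hp
    obtain ⟨k, hk, rfl⟩ := (PySem.List.mem_enumerate_iff _ _ _).1 hp
    exact PySem.List.index?_append_of_mem _ (List.getElem_mem hk)
  have h2 : List.filterMap (fun p =>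
      match PySem.List.index? (xs ++ [g]) p.2 with
      | some j => if (j : Int) < p.1 then some (p.1, (j : Int)) else none
      | none => none) (PySem.List.enumerate xs 0)
    = List.filterMap (fun p =>
      match PySem.List.index? xs p.2 with
      | some j => if (j : Int) < p.1 then some (p.1, (j : Int)) else none
      | none => none) (PySem.List.enumerate xs 0) := by
    apply List.filterMap_congr
    intro p hp
    rw [h1 p hp]
  rw [h2]
  congr 1
  rw [PySem.List.enumerate_cons, PySem.List.enumerate_nil, List.filterMap_cons,
      List.filterMap_nil]
  by_cases hg : g ∈ xs
  · have hidx : PySem.List.index? (xs ++ [g]) g = PySem.List.index? xs g :=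
      PySem.List.index?_append_of_mem _ hg
    obtain ⟨j, hj⟩ := Option.isSome_iff_exists.1
      ((PySem.List.index?_isSome_iff xs g).2 hg)
    have hjlt : j < xs.length := by
      obtain ⟨p1, s1, hps, hlen1, _⟩ := (PySem.List.index?_eq_some_iff _ _ _).1 hj
      subst hlen1; rw [hps]; simp
    rw [hidx, hj]
    simp only [hg, if_true]
    rw [if_pos (by omega)]
    simp
  · have hidx : PySem.List.index? (xs ++ [g]) g = some xs.length :=
      PySem.List.index?_append_singleton_self _ _ hg
    rw [hidx]
    simp only [hg, if_false]
    rw [if_neg (by omega)]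

-- pvDup's first components are strictly increasing
lemma pvDup_pairwise (pop suf : List Int) (s : Int) :
    (pvDup pop suf s).Pairwise (fun a b => a.1 < b.1) := by
  unfold pvDup
  have hfst : ∀ (r x : Int × Int),
      (match PySem.List.index? pop r.2 with
        | some j => if (j : Int) < r.1 then some (r.1, (j : Int)) else none
        | none => none) = some x → x.1 = r.1 := by
    intro r x h
    cases hi : PySem.List.index? pop r.2 with
    | none => rw [hi] at h; cases h
    | some j =>
      rw [hi] at h
      dsimp only at h
      split at h
      · cases h; rfl
      · cases h
  refine List.Pairwise.filterMap _ ?_ (PySem.List.pairwise_lt_enumerate suf s)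
  intro p q hpq b hb b' hb'
  rw [hfst p b hb, hfst q b' hb']
  exact hpq

-- B's positions bucket, snoc step
lemma pvPos_snoc (xs : List Int) (x g : Int) :
    pvPos (xs ++ [x]) g = pvPos xs g ++ (if x = g then [(xs.length : Int)] else []) := by
  unfold pvPos
  rw [PySem.List.enumerate_append, PySem.List.enumerate_cons, PySem.List.enumerate_nil,
      List.filter_append, List.map_append]
  congr 1
  by_cases hxg : x = g
  · simp [hxg]
  · simp [hxg]

-- the head of a positions bucket is the gene's first-occurrence index, offset by the start
lemma pvPos_head?' (xs : List Int) (g : Int) : ∀ (s : Int),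
    ((((PySem.List.enumerate xs s).filter (fun p => p.2 == g)).map (·.1)).head?)
      = (PySem.List.index? xs g).map (fun k : Nat => s + (k : Int)) := by
  induction xs with
  | nil =>
    intro s
    rw [PySem.List.enumerate_nil, PySem.List.index?_eq_idxOf?]
    simp
  | cons x rest ih =>
    intro s
    rw [PySem.List.enumerate_cons, List.filter_cons]
    by_cases hxg : x = g
    · subst hxg
      rw [PySem.List.index?_cons_self]
      simp
    · have hbe : ((s, x).2 == g) = false := by simpa using hxg
      simp only [hbe, Bool.false_eq_true, if_false]
      rw [ih (s + 1), PySem.List.index?_cons_of_ne _ (by simpa using hxg)]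
      cases PySem.List.index? rest g with
      | none => simp
      | some k => simp only [Option.map_some]; push_cast; ring_nf

-- B's bucket for a gene not in pop is empty
lemma pvPos_not_mem (pop : List Int) (g : Int) (h : g ∉ pop) : pvPos pop g = [] := by
  unfold pvPos
  rw [List.filter_eq_nil_iff.2, List.map_nil]
  intro p hp
  obtain ⟨k, hk, rfl⟩ := (PySem.List.mem_enumerate_iff _ _ _).1 hp
  simp only [beq_iff_eq]
  intro heq
  exact absurd (heq ▸ List.getElem_mem hk) h

-- B's inner loop on a cons cell
lemma pvPairsOfPositions_cons (a : Int) (t : List Int) :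
    pvPairsOfPositions (a :: t) = t.map (fun l => (l, a)) := by
  simp [pvPairsOfPositions, PySem.List.slice_from_one, PySem.List.pyGet?, PySem.List.pyIdx?]

-- B's bucket for g ∈ pop starts with g's first-occurrence index
lemma pvPos_head (pop : List Int) (g : Int) (h : g ∈ pop) :
    ∃ t, pvPos pop g = (((PySem.List.index? pop g).getD 0 : Nat) : Int) :: t := by
  obtain ⟨j, hj⟩ := Option.isSome_iff_exists.1
    ((PySem.List.index?_isSome_iff pop g).2 h)
  have hh := pvPos_head?' pop g 0
  rw [hj] at hh
  simp only [Option.map_some, zero_add] at hh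
  obtain ⟨t, ht⟩ := List.head?_eq_some_iff.1 hh
  exact ⟨t, by unfold pvPos; rw [ht, hj]; simp⟩

-- the unsorted pair list B builds, as a flatMap over the distinct genes
def pvPairs (pop : List Int) : List (Int × Int) :=
  (PySem.Set.ofList pop).flatMap (fun g => pvPairsOfPositions (pvPos pop g))

-- B's port equals the pvPairs formulation
lemma pvB_eq (pop : List Int) :
    count_duplicated_genes_alt pop
      = (((PySem.List.sorted (pvPairs pop) (fun p => p.1) false).length : Int),
         (PySem.List.sorted (pvPairs pop) (fun p => p.1) false).map (·.2)) := by
  have hfold : (PySem.List.enumerate pop).foldl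
      (fun (d : PySem.Dict Int (List Int)) p => d.modify p.2 [] (· ++ [p.1])) PySem.Dict.empty
    = ((PySem.List.enumerate pop).map (fun p => (p.2, p.1))).foldl
      (fun (d : PySem.Dict Int (List Int)) q => d.modify q.1 [] (· ++ [q.2])) PySem.Dict.empty := by
    rw [List.foldl_map]
  have hkeys : ((PySem.List.enumerate pop).foldl
      (fun (d : PySem.Dict Int (List Int)) p => d.modify p.2 [] (· ++ [p.1])) PySem.Dict.empty).keys
      = PySem.Set.ofList pop := by
    rw [PySem.Dict.keys_foldl_modify_key (PySem.List.enumerate pop) (fun p => p.2) []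
      (fun _ p => (· ++ [p.1])) PySem.Dict.empty, PySem.List.map_snd_enumerate]
    rfl
  have hnodup : ((PySem.List.enumerate pop).foldl
      (fun (d : PySem.Dict Int (List Int)) p => d.modify p.2 [] (· ++ [p.1])) PySem.Dict.empty).keys.Nodup :=
    PySem.Dict.nodup_keys_foldl_modify_key (PySem.List.enumerate pop) (fun p => p.2) []
      (fun _ p => (· ++ [p.1])) PySem.Dict.empty (by simp [PySem.Dict.keys_empty])
  have hget : ∀ g, ((PySem.List.enumerate pop).foldl
      (fun (d : PySem.Dict Int (List Int)) p => d.modify p.2 [] (· ++ [p.1])) PySem.Dict.empty).getD g []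
      = pvPos pop g := by
    intro g
    rw [hfold, PySem.Dict.getD_foldl_modify_append]
    simp only [pvPos, List.filter_map, List.map_map, PySem.Dict.getD_empty, List.nil_append]
    rfl
  have hvalues : ((PySem.List.enumerate pop).foldl
      (fun (d : PySem.Dict Int (List Int)) p => d.modify p.2 [] (· ++ [p.1])) PySem.Dict.empty).values
      = (PySem.Set.ofList pop).map (fun g => pvPos pop g) := by
    rw [PySem.Dict.values_eq_map_keys _ hnodup [], hkeys]
    exact List.map_congr_left (fun g _ => hget g)
  simp only [count_duplicated_genes_alt, hvalues, PySem.List.foldl_append_eq_flatMap,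
    List.flatMap_map, List.nil_append]
  rfl

-- appending one element to the bucket of one gene appends one pair, up to permutation
lemma pvFlatMap_perm {α β : Type} [DecidableEq α] (l : List α) (hnd : l.Nodup) (g : α)
    (hg : g ∈ l) (f f' : α → List β) (x : β)
    (hne : ∀ h ∈ l, h ≠ g → f' h = f h) (hgx : f' g = f g ++ [x]) :
    (l.flatMap f').Perm (l.flatMap f ++ [x]) := by
  revert hnd hg hne
  induction l with
  | nil => intro _ hg _; cases hg
  | cons a t ih =>
    intro hnd hg hne
    rcases List.nodup_cons.1 hnd with ⟨hat, hndt⟩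
    rw [List.flatMap_cons, List.flatMap_cons]
    by_cases hag : a = g
    · subst hag
      have hft : t.flatMap f' = t.flatMap f :=
        List.flatMap_congr (fun h ht => hne h (List.mem_cons_of_mem _ ht)
          (fun hEq => absurd (hEq ▸ ht) hat))
      rw [hgx, hft, List.append_assoc, List.append_assoc]
      exact List.Perm.append_left _ List.perm_append_comm
    · have hgt : g ∈ t := by
        rcases List.mem_cons.1 hg with h | h
        · exact absurd h.symm hag
        · exact h
      have hfa : f' a = f a := hne a (List.mem_cons_self) hag
      rw [hfa, List.append_assoc]
      exact List.Perm.append_left _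
        (ih hndt hgt (fun h ht hne' => hne h (List.mem_cons_of_mem _ ht) hne'))

-- B's unsorted pairs are a permutation of the reference list
lemma pvPairs_perm (pop : List Int) : (pvPairs pop).Perm (pvDup pop pop 0) := by
  induction pop using List.reverseRecOn with
  | nil => simp [pvPairs, pvDup, PySem.Set.ofList_nil]
  | append_singleton xs g ih =>
    rw [pvDup_snoc]
    by_cases hg : g ∈ xs
    · have hof : PySem.Set.ofList (xs ++ [g]) = PySem.Set.ofList xs := by
        rw [PySem.Set.ofList_append_singleton,
            PySem.Set.add_of_mem (by rwa [PySem.Set.mem_ofList])]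
      obtain ⟨t, ht⟩ := pvPos_head xs g hg
      have hx : pvPairsOfPositions (pvPos (xs ++ [g]) g)
          = pvPairsOfPositions (pvPos xs g)
            ++ [((xs.length : Int), (((PySem.List.index? xs g).getD 0 : Nat) : Int))] := by
        rw [pvPos_snoc, if_pos rfl, ht, List.cons_append,
            pvPairsOfPositions_cons, pvPairsOfPositions_cons, List.map_append]
        simp
      have hperm := pvFlatMap_perm (PySem.Set.ofList xs) (PySem.Set.nodup_ofList xs) g
        ((PySem.Set.mem_ofList xs g).2 hg)
        (fun h => pvPairsOfPositions (pvPos xs h))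
        (fun h => pvPairsOfPositions (pvPos (xs ++ [g]) h))
        ((xs.length : Int), (((PySem.List.index? xs g).getD 0 : Nat) : Int))
        (fun h _ hne => by dsimp only; rw [pvPos_snoc, if_neg (Ne.symm hne), List.append_nil]) hx
      unfold pvPairs
      rw [hof, if_pos hg]
      exact hperm.trans (ih.append_right _)
    · have hof : PySem.Set.ofList (xs ++ [g]) = PySem.Set.ofList xs ++ [g] := by
        rw [PySem.Set.ofList_append_singleton,
            PySem.Set.add_of_not_mem (by rwa [PySem.Set.mem_ofList])]
      unfold pvPairs
      rw [hof, if_neg hg, List.flatMap_append]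
      have h1 : (PySem.Set.ofList xs).flatMap (fun h => pvPairsOfPositions (pvPos (xs ++ [g]) h))
          = pvPairs xs := by
        apply List.flatMap_congr
        intro h hh
        have hgh : ¬ g = h := fun e => hg (by rw [e]; exact (PySem.Set.mem_ofList xs h).1 hh)
        rw [pvPos_snoc, if_neg hgh, List.append_nil]
      have h2 : pvPairsOfPositions (pvPos (xs ++ [g]) g) = [] := by
        rw [pvPos_snoc, if_pos rfl, pvPos_not_mem xs g hg, List.nil_append,
            pvPairsOfPositions_cons, List.map_nil]
      rw [h1]
      simp only [List.flatMap_cons, List.flatMap_nil, h2, List.append_nil]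
      exact ih

-- ===== VERDICT =====
theorem count_duplicated_genes_spec : Claim_equal_count_duplicated_genes := by
  intro population _
  unfold Spec_count_duplicated_genes
  have hsort : PySem.List.sorted (pvPairs population) (fun p => p.1) false
      = pvDup population population 0 :=
    PySem.List.sorted_eq_of_perm_of_pairwise_lt _ _ _ ((pvPairs_perm population).symm)
      (pvDup_pairwise population population 0)
  have hA := pvA_inv population population [] 0 [] rfl
  rw [pvB_eq, hsort]
  unfold count_duplicated_genes
  rw [show PySem.Set.ofList ([] : List Int) = PySem.Set.empty from rfl] at hA
  simp only [List.length_nil, Nat.cast_zero] at hA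
  rw [hA]
  simp
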